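-- pv_equiv track=rewrite | github.com/key-moon/golf | base_arcdsl_minified/task054.py | val_func_occurrences
-- ===== SOURCE A (Python) =====
-- _A=False
--
-- def val_func_lowermost(patch):return max(A for(A,B)in val_func_toindices(patch))
--
-- def val_func_rightmost(patch):return max(A for(B,A)in val_func_toindices(patch))
--
-- def val_func_leftmost(patch):return min(A for(B,A)in val_func_toindices(patch))
--
-- def val_func_uppermost(patch):return min(A for(A,B)in val_func_toindices(patch))
--
-- def val_func_toindices(patch):
-- 	A=patch
-- 	if len(A)==0:return frozenset()
-- 	if isinstance(next(iter(A))[1],tuple):return frozenset(A for(B,A)in A)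
-- 	return A
--
-- def val_func_shape(piece):A=piece;return val_func_height(A),val_func_width(A)
--
-- def val_func_occurrences(grid,obj):
-- 	A=grid;B=set();J=val_func_normalize(obj);C,D=len(A),len(A[0]);K,L=val_func_shape(obj);M,N=C-K+1,D-L+1
-- 	for E in range(M):
-- 		for F in range(N):
-- 			G=True
-- 			for(O,(H,I))in val_func_shift(J,(E,F)):
-- 				if not(0<=H<C and 0<=I<D and A[H][I]==O):G=_A;break
-- 			if G:B.add((E,F))
-- 	return frozenset(B)
--
-- def val_func_normalize(patch):
-- 	A=patch
-- 	if len(A)==0:return A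
-- 	return val_func_shift(A,(-val_func_uppermost(A),-val_func_leftmost(A)))
--
-- def val_func_shift(patch,directions):
-- 	A=patch
-- 	if len(A)==0:return A
-- 	B,C=directions
-- 	if isinstance(next(iter(A))[1],tuple):return frozenset((A,(D+B,E+C))for(A,(D,E))in A)
-- 	return frozenset((A+B,D+C)for(A,D)in A)
--
-- def val_func_width(piece):
-- 	A=piece
-- 	if len(A)==0:return 0
-- 	if isinstance(A,tuple):return len(A[0])
-- 	return val_func_rightmost(A)-val_func_leftmost(A)+1
--
-- def val_func_height(piece):
-- 	A=piece
-- 	if len(A)==0:return 0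
-- 	if isinstance(A,tuple):return len(A)
-- 	return val_func_lowermost(A)-val_func_uppermost(A)+1
-- ===== SOURCE B (Python) =====
-- def val_func_occurrences(grid, obj):
--     C, D = len(grid), len(grid[0])
--     if not obj:
--         return frozenset((E, F) for E in range(C + 1) for F in range(D + 1))
--     u = min(i for _, (i, _) in obj)
--     l = min(j for _, (_, j) in obj)
--     K = max(i for _, (i, _) in obj) - u + 1
--     L = max(j for _, (_, j) in obj) - l + 1
--     if K > C or L > D:
--         return frozenset()
--     rel = [(v, i - u, j - l) for v, (i, j) in obj]
--     v0, di, dj = rel[0]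
--     out = []
--     for r in range(C):
--         row = grid[r]
--         for c in range(D):
--             if row[c] == v0:
--                 E, F = r - di, c - dj
--                 if 0 <= E <= C - K and 0 <= F <= D - L and all(
--                         grid[E + i][F + j] == v for v, i, j in rel):
--                     out.append((E, F))
--     return frozenset(out)
-- ===== Notes on version B (the rewrite author's own statement) =====
-- stated objective: alternative
-- what changed: A slides an M*N window over the grid and re-verifies the whole object at every offset; B makes one pass over the grid collecting only the cells matching the object's first (anchor) cell's colour and verifies the full object only at those candidate offsets, with an early exit when the object cannot fit.
-- outside the precondition, e.g. on val_func_occurrences([], set()): A raises IndexError, B raises IndexError; on val_func_occurrences([[2, 0, 1, 2], [2, 1]], {(2, (0, 0)), (1, (-1, 2))}): A returns {(0, 0)}, B raises IndexError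
import Mathlib
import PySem

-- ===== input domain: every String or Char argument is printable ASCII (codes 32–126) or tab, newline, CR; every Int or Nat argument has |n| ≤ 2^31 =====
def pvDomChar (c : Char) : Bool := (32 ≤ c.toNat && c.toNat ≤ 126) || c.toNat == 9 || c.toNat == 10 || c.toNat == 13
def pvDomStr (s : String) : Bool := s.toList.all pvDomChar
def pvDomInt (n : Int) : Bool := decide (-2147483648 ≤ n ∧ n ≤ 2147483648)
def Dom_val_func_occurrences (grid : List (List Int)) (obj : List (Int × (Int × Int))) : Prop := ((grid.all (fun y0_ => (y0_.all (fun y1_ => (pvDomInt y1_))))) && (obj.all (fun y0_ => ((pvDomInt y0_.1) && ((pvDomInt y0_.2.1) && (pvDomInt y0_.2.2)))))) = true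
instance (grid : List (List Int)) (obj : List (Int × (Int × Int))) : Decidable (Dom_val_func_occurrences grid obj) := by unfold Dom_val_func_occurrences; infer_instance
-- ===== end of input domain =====

-- B replaces A's exhaustive window scan by anchor-based candidate generation: one grid pass
-- collects the positions of the first object cell's colour, and only those candidate offsets
-- are verified against the whole object (objective: alternative algorithm).

-- shared model of Python's min()/max() over a nonempty int iterable (both sources call them)
def pyMinInts : List Int → Int
  | [] => 0      -- unreachable: every call site guards len > 0
  | x :: xs => xs.foldl min x

def pyMaxInts : List Int → Int
  | [] => 0      -- unreachable: every call site guards len > 0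
  | x :: xs => xs.foldl max x

-- ===== PORT A =====
-- patch here is always a cell set {(v,(i,j))}, so the isinstance(...,tuple) branch is taken
def toindicesA (patch : List (Int × (Int × Int))) : List (Int × Int) :=
  PySem.Set.ofList (patch.map (·.2))

def uppermostA (patch : List (Int × (Int × Int))) : Int := pyMinInts ((toindicesA patch).map (·.1))
def leftmostA  (patch : List (Int × (Int × Int))) : Int := pyMinInts ((toindicesA patch).map (·.2))
def lowermostA (patch : List (Int × (Int × Int))) : Int := pyMaxInts ((toindicesA patch).map (·.1))
def rightmostA (patch : List (Int × (Int × Int))) : Int := pyMaxInts ((toindicesA patch).map (·.2))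

def shiftA (patch : List (Int × (Int × Int))) (d : Int × Int) : List (Int × (Int × Int)) :=
  if patch = [] then patch
  else PySem.Set.ofList (patch.map (fun x => (x.1, (x.2.1 + d.1, x.2.2 + d.2))))

def normalizeA (patch : List (Int × (Int × Int))) : List (Int × (Int × Int)) :=
  if patch = [] then patch
  else shiftA patch (-(uppermostA patch), -(leftmostA patch))

-- obj is never a tuple here, so height/width take the extent branch
def heightA (piece : List (Int × (Int × Int))) : Int :=
  if piece = [] then 0 else lowermostA piece - uppermostA piece + 1

def widthA (piece : List (Int × (Int × Int))) : Int :=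
  if piece = [] then 0 else rightmostA piece - leftmostA piece + 1

-- grid[0] raises IndexError on an empty grid, and grid[H][I] can raise on a ragged grid:
-- both are excluded by Pre_; headD/pyGetD-with-default agree with Python inside Pre_.
def val_func_occurrences (grid : List (List Int)) (obj : List (Int × (Int × Int))) : List (Int × Int) :=
  let J := normalizeA obj
  let C : Int := grid.length
  let D : Int := (grid.headD []).length
  let K := heightA obj
  let L := widthA obj
  let M := C - K + 1
  let N := D - L + 1
  (PySem.List.pyRange 0 M 1).foldl (fun B E =>
    (PySem.List.pyRange 0 N 1).foldl (fun B F =>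
      let S := shiftA J (E, F)
      let G := S.all (fun cell =>
        decide (0 ≤ cell.2.1 ∧ cell.2.1 < C ∧ 0 ≤ cell.2.2 ∧ cell.2.2 < D) &&
        (PySem.List.pyGetD (PySem.List.pyGetD grid cell.2.1 []) cell.2.2 0 == cell.1))
      if G then PySem.Set.add B (E, F) else B) B) []

-- ===== PORT B =====
def val_func_occurrences_alt (grid : List (List Int)) (obj : List (Int × (Int × Int))) : List (Int × Int) :=
  let C : Int := grid.length
  let D : Int := (grid.headD []).length
  if obj = [] then
    PySem.Set.ofList ((PySem.List.pyRange 0 (C + 1) 1).flatMap (fun E =>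
      (PySem.List.pyRange 0 (D + 1) 1).map (fun F => (E, F))))
  else
    let u := pyMinInts (obj.map (·.2.1))
    let l := pyMinInts (obj.map (·.2.2))
    let K := pyMaxInts (obj.map (·.2.1)) - u + 1
    let L := pyMaxInts (obj.map (·.2.2)) - l + 1
    if K > C ∨ L > D then []   -- 'if K > C or L > D: return frozenset()'
    else
    let rel := obj.map (fun x => (x.1, (x.2.1 - u, x.2.2 - l)))
    let a := rel.headD (0, (0, 0))   -- rel[0]; rel ≠ [] here
    let out := (PySem.List.pyRange 0 C 1).foldl (fun out r =>
      let row := PySem.List.pyGetD grid r []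
      (PySem.List.pyRange 0 D 1).foldl (fun out c =>
        if PySem.List.pyGetD row c 0 == a.1 then
          if decide (0 ≤ r - a.2.1 ∧ r - a.2.1 ≤ C - K ∧ 0 ≤ c - a.2.2 ∧ c - a.2.2 ≤ D - L) &&
             rel.all (fun t => PySem.List.pyGetD (PySem.List.pyGetD grid (r - a.2.1 + t.2.1) []) (c - a.2.2 + t.2.2) 0 == t.1)
          then out ++ [(r - a.2.1, c - a.2.2)] else out
        else out) out) []
    PySem.Set.ofList out

-- ===== PRECONDITION & SPEC =====
-- Pre_ excludes the empty grid (A raises IndexError on grid[0]) and, when the probe loops do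
-- run, grids having a row shorter than row 0: there A may raise, and whether it raises before
-- or after a failed match depends on frozenset iteration order, which is accidental.
def Pre_val_func_occurrences (grid : List (List Int)) (obj : List (Int × (Int × Int))) : Prop :=
  grid ≠ [] ∧
  (obj = [] ∨
   (grid.length : Int) < pyMaxInts (obj.map (·.2.1)) - pyMinInts (obj.map (·.2.1)) + 1 ∨
   ((grid.headD []).length : Int) < pyMaxInts (obj.map (·.2.2)) - pyMinInts (obj.map (·.2.2)) + 1 ∨
   ∀ row ∈ grid, (grid.headD []).length ≤ row.length)
instance (grid : List (List Int)) (obj : List (Int × (Int × Int))) : Decidable (Pre_val_func_occurrences grid obj) := by unfold Pre_val_func_occurrences; infer_instance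

def pvWitness_val_func_occurrences : List (List Int) × (List (Int × (Int × Int))) :=
  ([[1, 2], [2, 1]], [(2, (0, 1))])

def Spec_val_func_occurrences (grid : List (List Int)) (obj : List (Int × (Int × Int))) (out : List (Int × Int)) : Prop := out = val_func_occurrences_alt grid obj
instance (grid : List (List Int)) (obj : List (Int × (Int × Int))) (out : List (Int × Int)) : Decidable (Spec_val_func_occurrences grid obj out) := by unfold Spec_val_func_occurrences; infer_instance

-- ===== CLAIM (what is proved, stated in full; the proofs are below) =====
def Claim_equal_val_func_occurrences : Prop := ∀ (grid : List (List Int)) (obj : List (Int × (Int × Int))), Dom_val_func_occurrences grid obj → Pre_val_func_occurrences grid obj → Spec_val_func_occurrences grid obj (val_func_occurrences grid obj)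

-- ===== LEMMAS AND PROOFS =====

-- the row-major list of the positions of an M×N rectangle
def prodL (M N : Int) : List (Int × Int) :=
  (PySem.List.pyRange 0 M 1).flatMap (fun E => (PySem.List.pyRange 0 N 1).map (fun F => (E, F)))

def lexLt (a b : Int × Int) : Prop := a.1 < b.1 ∨ (a.1 = b.1 ∧ a.2 < b.2)

-- A's inner test, as a predicate of the candidate offset
def gaP (grid : List (List Int)) (J : List (Int × (Int × Int))) (x : Int × Int) : Bool :=
  (shiftA J x).all (fun cell =>
    decide (0 ≤ cell.2.1 ∧ cell.2.1 < (grid.length : Int) ∧ 0 ≤ cell.2.2 ∧ cell.2.2 < (((grid.headD []).length : Int))) &&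
    (PySem.List.pyGetD (PySem.List.pyGetD grid cell.2.1 []) cell.2.2 0 == cell.1))

-- B's inner test, as a predicate of the candidate grid cell
def gbP (grid : List (List Int)) (K L : Int) (rel : List (Int × (Int × Int))) (a : Int × (Int × Int)) (x : Int × Int) : Bool :=
  (PySem.List.pyGetD (PySem.List.pyGetD grid x.1 []) x.2 0 == a.1) &&
  (decide (0 ≤ x.1 - a.2.1 ∧ x.1 - a.2.1 ≤ (grid.length : Int) - K ∧ 0 ≤ x.2 - a.2.2 ∧ x.2 - a.2.2 ≤ ((grid.headD []).length : Int) - L) &&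
   rel.all (fun t => PySem.List.pyGetD (PySem.List.pyGetD grid (x.1 - a.2.1 + t.2.1) []) (x.2 - a.2.2 + t.2.2) 0 == t.1))

lemma mem_prodL {M N : Int} {x : Int × Int} :
    x ∈ prodL M N ↔ 0 ≤ x.1 ∧ x.1 < M ∧ 0 ≤ x.2 ∧ x.2 < N := by
  obtain ⟨a, b⟩ := x
  simp [prodL, List.mem_flatMap, List.mem_map, PySem.List.mem_pyRange_one, Prod.ext_iff, and_assoc]

lemma pairwise_prodL (M N : Int) : (prodL M N).Pairwise lexLt := by
  rw [prodL, List.pairwise_flatMap]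
  refine ⟨fun E _ => ?_, ?_⟩
  · rw [List.pairwise_map]
    exact (PySem.List.pairwise_lt_pyRange_one 0 N).imp (fun h => Or.inr ⟨rfl, h⟩)
  · apply (PySem.List.pairwise_lt_pyRange_one 0 M).imp
    intro E E' hEE' x hx y hy
    simp only [List.mem_map] at hx hy
    obtain ⟨F, _, rfl⟩ := hx; obtain ⟨F', _, rfl⟩ := hy
    exact Or.inl hEE'

lemma lexLt_irrefl {a b : Int × Int} (h : lexLt a b) : a ≠ b := by
  rcases h with h | ⟨h1, h2⟩ <;> (intro he; subst he; omega)

lemma nodup_prodL (M N : Int) : (prodL M N).Nodup :=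
  (pairwise_prodL M N).imp lexLt_irrefl

lemma nested_foldl_flat {γ : Type} (g : γ → Int × Int → γ) (LE LF : List Int) (acc : γ) :
    LE.foldl (fun B E => LF.foldl (fun B F => g B (E, F)) B) acc
      = (LE.flatMap (fun E => LF.map (fun F => (E, F)))).foldl g acc := by
  induction LE generalizing acc with
  | nil => rfl
  | cons E LE ih => simp [List.flatMap_cons, List.foldl_append, List.foldl_map, ih]

-- conditional Set.add over a duplicate-free stream disjoint from the accumulator is filter
lemma foldl_add_if_eq_filter (p : Int × Int → Bool) :
    ∀ (l : List (Int × Int)) (acc : List (Int × Int)), l.Nodup → (∀ x ∈ l, x ∉ acc) →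
    l.foldl (fun B x => if p x then PySem.Set.add B x else B) acc = acc ++ l.filter p := by
  intro l
  induction l with
  | nil => intro acc _ _; simp
  | cons x xs ih =>
    intro acc hnd hd
    have hx : x ∉ acc := hd x (List.mem_cons_self)
    simp only [List.foldl_cons, List.filter_cons]
    rcases List.nodup_cons.mp hnd with ⟨hxx, hnd'⟩
    by_cases hp : p x = true
    · rw [if_pos hp, if_pos hp, PySem.Set.add_of_not_mem hx, ih _ hnd'
        (fun y hy => by
          simp only [List.mem_append, List.mem_singleton]
          push Not
          exact ⟨hd y (List.mem_cons_of_mem _ hy), fun he => hxx (he ▸ hy)⟩)]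
      simp
    · rw [if_neg hp, if_neg hp, ih _ hnd' (fun y hy => hd y (List.mem_cons_of_mem _ hy))]

lemma foldl_min_le_init (xs : List Int) (a : Int) : xs.foldl min a ≤ a := by
  induction xs generalizing a with
  | nil => simp
  | cons y ys ih => exact le_trans (ih (min a y)) (min_le_left _ _)

lemma foldl_min_le_mem {xs : List Int} {x : Int} (hx : x ∈ xs) (a : Int) : xs.foldl min a ≤ x := by
  induction xs generalizing a with
  | nil => cases hx
  | cons y ys ih =>
    rcases List.mem_cons.mp hx with h | h
    · subst h
      exact le_trans (foldl_min_le_init ys (min a x)) (min_le_right _ _)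
    · exact ih h (min a y)

lemma foldl_min_mem (xs : List Int) (a : Int) : xs.foldl min a ∈ xs ∨ xs.foldl min a = a := by
  induction xs generalizing a with
  | nil => exact Or.inr rfl
  | cons y ys ih =>
    simp only [List.foldl_cons]
    rcases ih (min a y) with h | h
    · exact Or.inl (List.mem_cons_of_mem _ h)
    · rcases le_total a y with hay | hya
      · exact Or.inr (by rw [h, min_eq_left hay])
      · exact Or.inl (List.mem_cons.mpr (Or.inl (by rw [h, min_eq_right hya])))

lemma pyMinInts_le {l : List Int} {x : Int} (hx : x ∈ l) : pyMinInts l ≤ x := by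
  cases l with
  | nil => cases hx
  | cons y ys =>
    show ys.foldl min y ≤ x
    rcases List.mem_cons.mp hx with h | h
    · exact h ▸ foldl_min_le_init ys y
    · exact foldl_min_le_mem h y

lemma pyMinInts_mem {l : List Int} (h : l ≠ []) : pyMinInts l ∈ l := by
  cases l with
  | nil => exact absurd rfl h
  | cons y ys =>
    rcases foldl_min_mem ys y with h | h
    · exact List.mem_cons_of_mem _ h
    · exact List.mem_cons.mpr (Or.inl h)

lemma foldl_max_init_le (xs : List Int) (a : Int) : a ≤ xs.foldl max a := by
  induction xs generalizing a with
  | nil => simp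
  | cons y ys ih => exact le_trans (le_max_left _ _) (ih (max a y))

lemma foldl_max_mem_le {xs : List Int} {x : Int} (hx : x ∈ xs) (a : Int) : x ≤ xs.foldl max a := by
  induction xs generalizing a with
  | nil => cases hx
  | cons y ys ih =>
    rcases List.mem_cons.mp hx with h | h
    · subst h
      exact le_trans (le_max_right _ _) (foldl_max_init_le ys (max a x))
    · exact ih h (max a y)

lemma foldl_max_mem (xs : List Int) (a : Int) : xs.foldl max a ∈ xs ∨ xs.foldl max a = a := by
  induction xs generalizing a with
  | nil => exact Or.inr rfl
  | cons y ys ih =>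
    simp only [List.foldl_cons]
    rcases ih (max a y) with h | h
    · exact Or.inl (List.mem_cons_of_mem _ h)
    · rcases le_total a y with hay | hya
      · exact Or.inl (List.mem_cons.mpr (Or.inl (by rw [h, max_eq_right hay])))
      · exact Or.inr (by rw [h, max_eq_left hya])

lemma pyMaxInts_le {l : List Int} {x : Int} (hx : x ∈ l) : x ≤ pyMaxInts l := by
  cases l with
  | nil => cases hx
  | cons y ys =>
    show x ≤ ys.foldl max y
    rcases List.mem_cons.mp hx with h | h
    · exact h ▸ foldl_max_init_le ys y
    · exact foldl_max_mem_le h y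

lemma pyMaxInts_mem {l : List Int} (h : l ≠ []) : pyMaxInts l ∈ l := by
  cases l with
  | nil => exact absurd rfl h
  | cons y ys =>
    rcases foldl_max_mem ys y with h | h
    · exact List.mem_cons_of_mem _ h
    · exact List.mem_cons.mpr (Or.inl h)

lemma pyMinInts_congr {l1 l2 : List Int} (h : ∀ x, x ∈ l1 ↔ x ∈ l2) (h1 : l1 ≠ []) :
    pyMinInts l1 = pyMinInts l2 := by
  have h2 : l2 ≠ [] := by
    intro he; subst he
    exact absurd ((h _).mp (pyMinInts_mem h1)) (List.not_mem_nil)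
  exact le_antisymm (pyMinInts_le ((h _).mpr (pyMinInts_mem h2)))
    (pyMinInts_le ((h _).mp (pyMinInts_mem h1)))

lemma pyMaxInts_congr {l1 l2 : List Int} (h : ∀ x, x ∈ l1 ↔ x ∈ l2) (h1 : l1 ≠ []) :
    pyMaxInts l1 = pyMaxInts l2 := by
  have h2 : l2 ≠ [] := by
    intro he; subst he
    exact absurd ((h _).mp (pyMaxInts_mem h1)) (List.not_mem_nil)
  exact le_antisymm (pyMaxInts_le ((h _).mp (pyMaxInts_mem h1)))
    (pyMaxInts_le ((h _).mpr (pyMaxInts_mem h2)))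

-- two strictly lex-increasing lists with the same members are equal
lemma eq_of_pairwise_lexLt_of_mem_iff :
    ∀ (l1 l2 : List (Int × Int)), l1.Pairwise lexLt → l2.Pairwise lexLt →
    (∀ x, x ∈ l1 ↔ x ∈ l2) → l1 = l2 := by
  intro l1 l2 h1 h2 hm
  exact List.Perm.eq_of_pairwise
    (fun a b _ _ hab hba => by
      exfalso; rcases hab with h | ⟨e1, h⟩ <;> rcases hba with h' | ⟨e1', h'⟩ <;> omega)
    h1 h2
    ((List.perm_ext_iff_of_nodup (h1.imp lexLt_irrefl) (h2.imp lexLt_irrefl)).mpr hm)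

-- A's port is the row-major rectangle scan filtered by its window test
lemma A_eq_filter (grid : List (List Int)) (obj : List (Int × (Int × Int))) :
    val_func_occurrences grid obj
      = (prodL ((grid.length : Int) - heightA obj + 1) (((grid.headD []).length : Int) - widthA obj + 1)).filter
          (gaP grid (normalizeA obj)) := by
  have h1 := nested_foldl_flat
      (g := fun B x => if gaP grid (normalizeA obj) x then PySem.Set.add B x else B)
      (PySem.List.pyRange 0 ((grid.length : Int) - heightA obj + 1) 1)
      (PySem.List.pyRange 0 (((grid.headD []).length : Int) - widthA obj + 1) 1) []
  have h2 := foldl_add_if_eq_filter (gaP grid (normalizeA obj))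
      (prodL ((grid.length : Int) - heightA obj + 1) (((grid.headD []).length : Int) - widthA obj + 1)) []
      (nodup_prodL _ _) (by simp)
  exact (h1.trans h2).trans (by simp)

-- B's port (nonempty object) is the candidate scan filtered by its test, translated
lemma B_eq_filter (grid : List (List Int)) (obj : List (Int × (Int × Int))) (h : ¬ obj = [])
    (u l K L : Int) (rel : List (Int × (Int × Int))) (a : Int × (Int × Int))
    (hu : u = pyMinInts (obj.map (·.2.1))) (hl : l = pyMinInts (obj.map (·.2.2)))
    (hK : K = pyMaxInts (obj.map (·.2.1)) - u + 1) (hL : L = pyMaxInts (obj.map (·.2.2)) - l + 1)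
    (hrel : rel = obj.map (fun x => (x.1, (x.2.1 - u, x.2.2 - l))))
    (ha : a = rel.headD (0, (0, 0)))
    (hnw : ¬ (K > (grid.length : Int) ∨ L > ((grid.headD []).length : Int))) :
    val_func_occurrences_alt grid obj
      = PySem.Set.ofList
          (((prodL (grid.length : Int) ((grid.headD []).length : Int)).filter (gbP grid K L rel a)).map
            (fun x => (x.1 - a.2.1, x.2 - a.2.2))) := by
  simp only [val_func_occurrences_alt, if_neg h]
  rw [← hu, ← hl, ← hK, ← hL]
  rw [if_neg hnw]
  rw [← hrel, ← ha]
  have hbody : (fun (out : List (Int × Int)) (x : Int × Int) =>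
      if PySem.List.pyGetD (PySem.List.pyGetD grid x.1 []) x.2 0 == a.1 then
        if decide (0 ≤ x.1 - a.2.1 ∧ x.1 - a.2.1 ≤ (grid.length : Int) - K ∧
                   0 ≤ x.2 - a.2.2 ∧ x.2 - a.2.2 ≤ ((grid.headD []).length : Int) - L) &&
           rel.all (fun t => PySem.List.pyGetD (PySem.List.pyGetD grid (x.1 - a.2.1 + t.2.1) []) (x.2 - a.2.2 + t.2.2) 0 == t.1)
        then out ++ [(x.1 - a.2.1, x.2 - a.2.2)] else out
      else out)
      = (fun (out : List (Int × Int)) (x : Int × Int) =>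
          if gbP grid K L rel a x then out ++ [(x.1 - a.2.1, x.2 - a.2.2)] else out) := by
    funext out x
    by_cases h1 : (PySem.List.pyGetD (PySem.List.pyGetD grid x.1 []) x.2 0 == a.1) = true
    · simp only [gbP, h1, if_true, Bool.true_and]
    · simp only [Bool.not_eq_true] at h1
      simp only [gbP, h1, Bool.false_and, Bool.false_eq_true, if_false]
  have h1 := nested_foldl_flat
      (g := fun (out : List (Int × Int)) (x : Int × Int) =>
        if PySem.List.pyGetD (PySem.List.pyGetD grid x.1 []) x.2 0 == a.1 then
          if decide (0 ≤ x.1 - a.2.1 ∧ x.1 - a.2.1 ≤ (grid.length : Int) - K ∧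
                     0 ≤ x.2 - a.2.2 ∧ x.2 - a.2.2 ≤ ((grid.headD []).length : Int) - L) &&
             rel.all (fun t => PySem.List.pyGetD (PySem.List.pyGetD grid (x.1 - a.2.1 + t.2.1) []) (x.2 - a.2.2 + t.2.2) 0 == t.1)
          then out ++ [(x.1 - a.2.1, x.2 - a.2.2)] else out
        else out)
      (PySem.List.pyRange 0 (grid.length : Int) 1)
      (PySem.List.pyRange 0 ((grid.headD []).length : Int) 1) []
  rw [hbody] at h1
  have h2 := PySem.List.foldl_append_if (gbP grid K L rel a)
      (fun x => (x.1 - a.2.1, x.2 - a.2.2))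
      (l := prodL (grid.length : Int) ((grid.headD []).length : Int)) (acc := [])
  exact congrArg PySem.Set.ofList ((h1.trans h2).trans (by simp))

-- B's port returns [] at its early exit
lemma B_eq_nil (grid : List (List Int)) (obj : List (Int × (Int × Int))) (h : ¬ obj = [])
    (u l K L : Int)
    (hu : u = pyMinInts (obj.map (·.2.1))) (hl : l = pyMinInts (obj.map (·.2.2)))
    (hK : K = pyMaxInts (obj.map (·.2.1)) - u + 1) (hL : L = pyMaxInts (obj.map (·.2.2)) - l + 1)
    (hnw : K > (grid.length : Int) ∨ L > ((grid.headD []).length : Int)) :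
    val_func_occurrences_alt grid obj = [] := by
  simp only [val_func_occurrences_alt, if_neg h]
  rw [← hu, ← hl, ← hK, ← hL]
  rw [if_pos hnw]

lemma prodL_eq_nil {M N : Int} (hMN : M ≤ 0 ∨ N ≤ 0) : prodL M N = [] := by
  rcases hMN with hM | hN
  · rw [prodL, PySem.List.pyRange_one_eq_nil hM]; rfl
  · rw [prodL, PySem.List.pyRange_one_eq_nil hN]
    simp

-- A's extents over the deduplicated index set are the plain min/max over the cell list
lemma uppermostA_eq (obj : List (Int × (Int × Int))) (h : obj ≠ []) :
    uppermostA obj = pyMinInts (obj.map (·.2.1)) := by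
  apply pyMinInts_congr
  · intro z
    simp only [toindicesA, List.mem_map, PySem.Set.mem_ofList]
    constructor
    · rintro ⟨w, ⟨cell, hc, rfl⟩, rfl⟩; exact ⟨cell, hc, rfl⟩
    · rintro ⟨cell, hc, rfl⟩; exact ⟨cell.2, ⟨cell, hc, rfl⟩, rfl⟩
  · obtain ⟨o, obj', rfl⟩ := List.exists_cons_of_ne_nil h
    have : o.2.1 ∈ (toindicesA (o :: obj')).map (·.1) := by
      simp only [toindicesA, List.mem_map, PySem.Set.mem_ofList]
      exact ⟨o.2, ⟨o, List.mem_cons_self, rfl⟩, rfl⟩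
    exact List.ne_nil_of_mem this

lemma leftmostA_eq (obj : List (Int × (Int × Int))) (h : obj ≠ []) :
    leftmostA obj = pyMinInts (obj.map (·.2.2)) := by
  apply pyMinInts_congr
  · intro z
    simp only [toindicesA, List.mem_map, PySem.Set.mem_ofList]
    constructor
    · rintro ⟨w, ⟨cell, hc, rfl⟩, rfl⟩; exact ⟨cell, hc, rfl⟩
    · rintro ⟨cell, hc, rfl⟩; exact ⟨cell.2, ⟨cell, hc, rfl⟩, rfl⟩
  · obtain ⟨o, obj', rfl⟩ := List.exists_cons_of_ne_nil h
    have : o.2.2 ∈ (toindicesA (o :: obj')).map (·.2) := by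
      simp only [toindicesA, List.mem_map, PySem.Set.mem_ofList]
      exact ⟨o.2, ⟨o, List.mem_cons_self, rfl⟩, rfl⟩
    exact List.ne_nil_of_mem this

lemma lowermostA_eq (obj : List (Int × (Int × Int))) (h : obj ≠ []) :
    lowermostA obj = pyMaxInts (obj.map (·.2.1)) := by
  apply pyMaxInts_congr
  · intro z
    simp only [toindicesA, List.mem_map, PySem.Set.mem_ofList]
    constructor
    · rintro ⟨w, ⟨cell, hc, rfl⟩, rfl⟩; exact ⟨cell, hc, rfl⟩
    · rintro ⟨cell, hc, rfl⟩; exact ⟨cell.2, ⟨cell, hc, rfl⟩, rfl⟩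
  · obtain ⟨o, obj', rfl⟩ := List.exists_cons_of_ne_nil h
    have : o.2.1 ∈ (toindicesA (o :: obj')).map (·.1) := by
      simp only [toindicesA, List.mem_map, PySem.Set.mem_ofList]
      exact ⟨o.2, ⟨o, List.mem_cons_self, rfl⟩, rfl⟩
    exact List.ne_nil_of_mem this

lemma rightmostA_eq (obj : List (Int × (Int × Int))) (h : obj ≠ []) :
    rightmostA obj = pyMaxInts (obj.map (·.2.2)) := by
  apply pyMaxInts_congr
  · intro z
    simp only [toindicesA, List.mem_map, PySem.Set.mem_ofList]
    constructor
    · rintro ⟨w, ⟨cell, hc, rfl⟩, rfl⟩; exact ⟨cell, hc, rfl⟩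
    · rintro ⟨cell, hc, rfl⟩; exact ⟨cell.2, ⟨cell, hc, rfl⟩, rfl⟩
  · obtain ⟨o, obj', rfl⟩ := List.exists_cons_of_ne_nil h
    have : o.2.2 ∈ (toindicesA (o :: obj')).map (·.2) := by
      simp only [toindicesA, List.mem_map, PySem.Set.mem_ofList]
      exact ⟨o.2, ⟨o, List.mem_cons_self, rfl⟩, rfl⟩
    exact List.ne_nil_of_mem this

-- A's window test, in terms of the original object cells
lemma gaP_iff (grid : List (List Int)) (obj : List (Int × (Int × Int))) (u l : Int)
    (h : obj ≠ []) (hu : u = uppermostA obj) (hl : l = leftmostA obj) (x : Int × Int) :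
    gaP grid (normalizeA obj) x = true ↔
      ∀ cell ∈ obj,
        (0 ≤ x.1 + (cell.2.1 - u) ∧ x.1 + (cell.2.1 - u) < (grid.length : Int) ∧
         0 ≤ x.2 + (cell.2.2 - l) ∧ x.2 + (cell.2.2 - l) < ((grid.headD []).length : Int)) ∧
        PySem.List.pyGetD (PySem.List.pyGetD grid (x.1 + (cell.2.1 - u)) []) (x.2 + (cell.2.2 - l)) 0 = cell.1 := by
  subst hu hl
  have hJ : normalizeA obj = PySem.Set.ofList (obj.map (fun c => (c.1, (c.2.1 + -(uppermostA obj), c.2.2 + -(leftmostA obj))))) := by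
    rw [normalizeA, if_neg h, shiftA, if_neg h]
  have hJne : normalizeA obj ≠ [] := by
    rw [hJ]
    obtain ⟨o, obj', rfl⟩ := List.exists_cons_of_ne_nil h
    exact List.ne_nil_of_mem ((PySem.Set.mem_ofList _ _).mpr (List.mem_map_of_mem List.mem_cons_self))
  rw [gaP, shiftA, if_neg hJne, hJ]
  rw [List.all_eq_true]
  constructor
  · intro hall cell hc
    have := hall _ ((PySem.Set.mem_ofList _ _).mpr (List.mem_map_of_mem (l := PySem.Set.ofList _)
      ((PySem.Set.mem_ofList _ _).mpr (List.mem_map_of_mem hc))))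
    simp only [Bool.and_eq_true, decide_eq_true_iff, beq_iff_eq] at this
    have e1 : cell.2.1 + -(uppermostA obj) + x.1 = x.1 + (cell.2.1 - uppermostA obj) := by ring
    have e2 : cell.2.2 + -(leftmostA obj) + x.2 = x.2 + (cell.2.2 - leftmostA obj) := by ring
    rw [e1, e2] at this
    exact ⟨⟨this.1.1, this.1.2.1, this.1.2.2.1, this.1.2.2.2⟩, this.2⟩
  · intro hall y hy
    rw [PySem.Set.mem_ofList, List.mem_map] at hy
    obtain ⟨w, hw, rfl⟩ := hy
    rw [PySem.Set.mem_ofList, List.mem_map] at hw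
    obtain ⟨cell, hc, rfl⟩ := hw
    have := hall cell hc
    simp only [Bool.and_eq_true, decide_eq_true_iff, beq_iff_eq]
    have e1 : cell.2.1 + -(uppermostA obj) + x.1 = x.1 + (cell.2.1 - uppermostA obj) := by ring
    have e2 : cell.2.2 + -(leftmostA obj) + x.2 = x.2 + (cell.2.2 - leftmostA obj) := by ring
    rw [e1, e2]
    exact ⟨⟨this.1.1, this.1.2.1, this.1.2.2.1, this.1.2.2.2⟩, this.2⟩

-- B's candidate test, in terms of the original object cells
lemma gbP_iff (grid : List (List Int)) (obj : List (Int × (Int × Int))) (u l K L : Int)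
    (rel : List (Int × (Int × Int))) (a : Int × (Int × Int))
    (hrel : rel = obj.map (fun c => (c.1, (c.2.1 - u, c.2.2 - l)))) (x : Int × Int) :
    gbP grid K L rel a x = true ↔
      PySem.List.pyGetD (PySem.List.pyGetD grid x.1 []) x.2 0 = a.1 ∧
      (0 ≤ x.1 - a.2.1 ∧ x.1 - a.2.1 ≤ (grid.length : Int) - K ∧
       0 ≤ x.2 - a.2.2 ∧ x.2 - a.2.2 ≤ ((grid.headD []).length : Int) - L) ∧
      ∀ cell ∈ obj,
        PySem.List.pyGetD (PySem.List.pyGetD grid (x.1 - a.2.1 + (cell.2.1 - u)) []) (x.2 - a.2.2 + (cell.2.2 - l)) 0 = cell.1 := by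
  subst hrel
  simp only [gbP, Bool.and_eq_true, decide_eq_true_iff, beq_iff_eq, List.all_eq_true,
    List.forall_mem_map, and_assoc]

-- ===== VERDICT (by name: the statement is the Claim_ definition above) =====
theorem val_func_occurrences_spec : Claim_equal_val_func_occurrences := by
  intro grid obj _ _
  show val_func_occurrences grid obj = val_func_occurrences_alt grid obj
  by_cases h : obj = []
  · subst h
    rw [A_eq_filter]
    have h0 : heightA ([] : List (Int × (Int × Int))) = 0 := rfl
    have w0 : widthA ([] : List (Int × (Int × Int))) = 0 := rfl
    rw [h0, w0, List.filter_eq_self.mpr (fun (x : Int × Int) _ => (rfl : gaP grid (normalizeA []) x = true))]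
    have e1 : (grid.length : Int) - 0 + 1 = (grid.length : Int) + 1 := by ring
    have e2 : ((grid.headD []).length : Int) - 0 + 1 = ((grid.headD []).length : Int) + 1 := by ring
    rw [e1, e2]
    exact (PySem.Set.ofList_eq_self_of_nodup _ (nodup_prodL ((grid.length : Int) + 1) (((grid.headD []).length : Int) + 1))).symm
  · obtain ⟨o, tl, hobj⟩ := List.exists_cons_of_ne_nil h
    by_cases hnw : (pyMaxInts (obj.map (·.2.1)) - pyMinInts (obj.map (·.2.1)) + 1) > (grid.length : Int) ∨
        (pyMaxInts (obj.map (·.2.2)) - pyMinInts (obj.map (·.2.2)) + 1) > ((grid.headD []).length : Int)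
    · have hK : heightA obj = pyMaxInts (obj.map (·.2.1)) - pyMinInts (obj.map (·.2.1)) + 1 := by
        rw [heightA, if_neg h, lowermostA_eq obj h, uppermostA_eq obj h]
      have hL : widthA obj = pyMaxInts (obj.map (·.2.2)) - pyMinInts (obj.map (·.2.2)) + 1 := by
        rw [widthA, if_neg h, rightmostA_eq obj h, leftmostA_eq obj h]
      rw [A_eq_filter, hK, hL, B_eq_nil grid obj h _ _ _ _ rfl rfl rfl rfl hnw,
        prodL_eq_nil (by omega)]
      rfl
    rw [A_eq_filter, B_eq_filter grid obj h
      (pyMinInts (obj.map (·.2.1))) (pyMinInts (obj.map (·.2.2)))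
      (pyMaxInts (obj.map (·.2.1)) - pyMinInts (obj.map (·.2.1)) + 1)
      (pyMaxInts (obj.map (·.2.2)) - pyMinInts (obj.map (·.2.2)) + 1)
      (obj.map (fun c => (c.1, (c.2.1 - pyMinInts (obj.map (·.2.1)), c.2.2 - pyMinInts (obj.map (·.2.2))))))
      (o.1, (o.2.1 - pyMinInts (obj.map (·.2.1)), o.2.2 - pyMinInts (obj.map (·.2.2))))
      rfl rfl rfl rfl rfl (by rw [hobj]; rfl) hnw]
    have hK : heightA obj = pyMaxInts (obj.map (·.2.1)) - pyMinInts (obj.map (·.2.1)) + 1 := by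
      rw [heightA, if_neg h, lowermostA_eq obj h, uppermostA_eq obj h]
    have hL : widthA obj = pyMaxInts (obj.map (·.2.2)) - pyMinInts (obj.map (·.2.2)) + 1 := by
      rw [widthA, if_neg h, rightmostA_eq obj h, leftmostA_eq obj h]
    rw [hK, hL]
    set u := pyMinInts (obj.map (·.2.1)) with hu
    set lo := pyMinInts (obj.map (·.2.2)) with hlo
    set mu := pyMaxInts (obj.map (·.2.1)) with hmu
    set ml := pyMaxInts (obj.map (·.2.2)) with hml
    have hmemo : o ∈ obj := hobj ▸ List.mem_cons_self
    have hbnd : ∀ cell ∈ obj, u ≤ cell.2.1 ∧ cell.2.1 ≤ mu ∧ lo ≤ cell.2.2 ∧ cell.2.2 ≤ ml :=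
      fun cell hc => ⟨pyMinInts_le (List.mem_map_of_mem hc), pyMaxInts_le (List.mem_map_of_mem hc),
        pyMinInts_le (List.mem_map_of_mem hc), pyMaxInts_le (List.mem_map_of_mem hc)⟩
    have idx : ∀ (z z' w w' : Int), z = z' → w = w' →
        PySem.List.pyGetD (PySem.List.pyGetD grid z []) w 0 = PySem.List.pyGetD (PySem.List.pyGetD grid z' []) w' 0 := by
      rintro _ _ _ _ rfl rfl; rfl
    have hpw2 : (((prodL (grid.length : Int) ((grid.headD []).length : Int)).filter
        (gbP grid (mu - u + 1) (ml - lo + 1) (obj.map (fun c => (c.1, (c.2.1 - u, c.2.2 - lo)))) (o.1, (o.2.1 - u, o.2.2 - lo)))).map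
        (fun x => (x.1 - (o.1, (o.2.1 - u, o.2.2 - lo)).2.1, x.2 - (o.1, (o.2.1 - u, o.2.2 - lo)).2.2))).Pairwise lexLt := by
      refine List.Pairwise.map (R := lexLt) _ ?_ ((pairwise_prodL _ _).filter _)
      intro p q hpq
      rcases hpq with h1 | ⟨h1, h2⟩
      · exact Or.inl (by dsimp only; omega)
      · exact Or.inr ⟨by dsimp only; omega, by dsimp only; omega⟩
    rw [PySem.Set.ofList_eq_self_of_nodup _ (hpw2.imp lexLt_irrefl)]
    apply eq_of_pairwise_lexLt_of_mem_iff
    · exact (pairwise_prodL _ _).filter _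
    · exact hpw2
    intro x
    obtain ⟨x1, x2⟩ := x
    rw [List.mem_filter, mem_prodL,
      gaP_iff grid obj u lo h (by rw [uppermostA_eq obj h]) (by rw [leftmostA_eq obj h]) (x1, x2),
      List.mem_map]
    constructor
    · rintro ⟨⟨hx1, hx2, hx3, hx4⟩, hall⟩
      dsimp only at hx1 hx2 hx3 hx4
      obtain ⟨⟨ho1, ho2, ho3, ho4⟩, hvo⟩ := hall o hmemo
      dsimp only at ho1 ho2 ho3 ho4 hvo
      refine ⟨(x1 + (o.2.1 - u), x2 + (o.2.2 - lo)), ?_, ?_⟩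
      · rw [List.mem_filter, mem_prodL,
          gbP_iff grid obj u lo (mu - u + 1) (ml - lo + 1) _ _ rfl]
        dsimp only
        refine ⟨⟨ho1, ho2, ho3, ho4⟩, hvo, ⟨by omega, by omega, by omega, by omega⟩, ?_⟩
        intro cell hc
        obtain ⟨hb, hv⟩ := hall cell hc
        dsimp only at hv
        convert hv using 3 <;> ring
      · dsimp only
        simp only [Prod.mk.injEq]
        constructor <;> ring
    · rintro ⟨y, hy, heq⟩
      rw [Prod.mk.injEq] at heq
      obtain ⟨e1, e2⟩ := heq
      dsimp only at e1 e2
      subst e1; subst e2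
      rw [List.mem_filter, mem_prodL,
        gbP_iff grid obj u lo (mu - u + 1) (ml - lo + 1) _ _ rfl] at hy
      obtain ⟨⟨hy1, hy2, hy3, hy4⟩, hval, ⟨hb1, hb2, hb3, hb4⟩, hall⟩ := hy
      dsimp only at hy1 hy2 hy3 hy4 hval hb1 hb2 hb3 hb4 hall ⊢
      refine ⟨⟨by omega, by omega, by omega, by omega⟩, ?_⟩
      intro cell hc
      obtain ⟨hcu, hcmu, hclo, hcml⟩ := hbnd cell hc
      refine ⟨⟨by omega, by omega, by omega, by omega⟩, ?_⟩
      exact hall cell hc
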